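-- pv_equiv track=rewrite | github.com/rdguerrerom/Fast_Chess_Agent | agent/agent_v2.py | _compress_rank
-- ===== SOURCE A (Python) =====
-- from typing import List, Tuple, Optional, Dict, Any
--
-- def _compress_rank(rank_squares: List[str]) -> str:
--     """Compress rank representation efficiently"""
--     compressed = []
--     empty_count = 0
--
--     for square in rank_squares:
--         if square == " ":
--             empty_count += 1
--         else:
--             if empty_count > 0:
--                 compressed.append(str(empty_count))
--                 empty_count = 0
--             compressed.append(square)
--
--     if empty_count > 0:
--         compressed.append(str(empty_count))
--
--     return "".join(compressed)
-- ===== SOURCE B (Python) =====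
-- from typing import List
--
--
-- def _merge(left, right):
--     """Concatenate two token lists, fusing a space-run count at the seam."""
--     if isinstance(left[-1], int) and right and isinstance(right[0], int):
--         return left[:-1] + [left[-1] + right[0]] + right[1:]
--     return left + right
--
--
-- def _conquer(seg):
--     """Divide and conquer: token list (int = space-run length, str = piece)."""
--     if len(seg) <= 1:
--         return [1] if seg[0] == " " else [seg[0]]
--     mid = len(seg) // 2
--     return _merge(_conquer(seg[:mid]), _conquer(seg[mid:]))
--
--
-- def _compress_rank(rank_squares: List[str]) -> str:
--     if not rank_squares:
--         return ""
--     toks = _conquer(rank_squares)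
--     return "".join(str(t) if isinstance(t, int) else t for t in toks)
-- ===== Notes on version B (the rewrite author's own statement) =====
-- stated objective: alternative
-- what changed: Replaces A's single left-to-right pass with an empty_count accumulator by a divide-and-conquer: the rank is split in half recursively into token lists (int = space-run length, str = piece) that are merged by fusing adjacent space-run counts at the seam, then rendered.
import Mathlib
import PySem

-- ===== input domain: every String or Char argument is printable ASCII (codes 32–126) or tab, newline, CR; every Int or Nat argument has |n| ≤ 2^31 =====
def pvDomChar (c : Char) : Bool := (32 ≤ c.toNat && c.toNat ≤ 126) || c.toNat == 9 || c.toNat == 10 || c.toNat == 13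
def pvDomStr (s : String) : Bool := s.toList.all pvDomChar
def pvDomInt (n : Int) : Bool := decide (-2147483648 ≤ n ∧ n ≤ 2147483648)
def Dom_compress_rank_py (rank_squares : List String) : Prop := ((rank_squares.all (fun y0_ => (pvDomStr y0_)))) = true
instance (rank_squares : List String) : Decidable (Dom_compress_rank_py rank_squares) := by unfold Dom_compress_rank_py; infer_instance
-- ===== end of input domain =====

-- B replaces A's single left-to-right pass with an empty_count accumulator by a
-- divide-and-conquer over the rank: halves are compressed into token lists
-- (Int = space-run length, String = piece) and merged, fusing counts at the seam (alternative).

-- ===== PORT A =====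
-- the for-loop of A, carrying (compressed, empty_count); the [] case is the trailing flush
def pvALoop (l : List String) (comp : List String) (ec : Int) : List String :=
  match l with
  | [] => if ec > 0 then comp ++ [PySem.Int.toStr ec] else comp
  | square :: rest =>
    if square = " " then
      pvALoop rest comp (ec + 1)
    else
      pvALoop rest (comp ++ (if ec > 0 then [PySem.Int.toStr ec] else []) ++ [square]) 0

def compress_rank_py (rank_squares : List String) : String :=
  PySem.Str.join "" (pvALoop rank_squares [] 0)

-- ===== PORT B =====
-- a token is either a space-run length (Python int) or a piece (Python str)
abbrev pvTok := Int ⊕ String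

-- _merge: left[:-1] + [left[-1] + right[0]] + right[1:] when both seam tokens are counts,
-- else left + right (left[-1] on empty left is unreachable: _merge gets non-empty lists)
def pvMerge (l r : List pvTok) : List pvTok :=
  match l.getLast?, r with
  | some (Sum.inl x), Sum.inl y :: rt => l.dropLast ++ (Sum.inl (x + y) :: rt)
  | _, _ => l ++ r

-- _conquer: divide and conquer into a token list
def pvConquer (seg : List String) : List pvTok :=
  if hlen : seg.length ≤ 1 then
    match seg with
    | [x] => if x = " " then [Sum.inl 1] else [Sum.inr x]
    | _ => []           -- unreachable: _conquer is only called on non-empty segments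
  else
    pvMerge (pvConquer (seg.take (seg.length / 2))) (pvConquer (seg.drop (seg.length / 2)))
termination_by seg.length
decreasing_by
  · simp only [List.length_take]; omega
  · simp only [List.length_drop]; omega

def compress_rank_py_alt (rank_squares : List String) : String :=
  if rank_squares = [] then ""
  else
    PySem.Str.join ""
      ((pvConquer rank_squares).map
        (fun t => match t with | Sum.inl n => PySem.Int.toStr n | Sum.inr s => s))

-- ===== PRECONDITION & SPEC =====
def Spec_compress_rank_py (rank_squares : List String) (out : String) : Prop := out = compress_rank_py_alt rank_squares
instance (rank_squares : List String) (out : String) : Decidable (Spec_compress_rank_py rank_squares out) := by unfold Spec_compress_rank_py; infer_instance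

-- ===== CLAIM (what is proved, stated in full; the proofs are below) =====
def Claim_equal_compress_rank_py : Prop := ∀ (rank_squares : List String), Dom_compress_rank_py rank_squares → Spec_compress_rank_py rank_squares (compress_rank_py rank_squares)

-- ===== LEMMAS AND PROOFS =====

-- proof-side recursive formulation of the seam merge
def pvMergeRec : List pvTok → List pvTok → List pvTok
  | [], r => r
  | [h], r =>
    match h, r with
    | Sum.inl x, Sum.inl y :: rt => Sum.inl (x + y) :: rt
    | _, _ => h :: r
  | h :: t, r => h :: pvMergeRec t r

theorem pvMerge_eq_rec (l r : List pvTok) : pvMerge l r = pvMergeRec l r := by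
  induction l with
  | nil => cases r with
    | nil => rfl
    | cons r0 rt => cases r0 <;> rfl
  | cons h t ih =>
    cases t with
    | nil =>
      cases h with
      | inl x => cases r with
        | nil => rfl
        | cons r0 rt => cases r0 <;> rfl
      | inr s => cases r with
        | nil => rfl
        | cons r0 rt => cases r0 <;> rfl
    | cons h2 t2 =>
      have hlast : (h :: h2 :: t2).getLast? = (h2 :: t2).getLast? := by
        simp [List.getLast?_cons_cons]
      have hdrop : (h :: h2 :: t2).dropLast = h :: (h2 :: t2).dropLast := rfl
      simp only [pvMergeRec, ← ih, pvMerge, hlast, hdrop]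
      cases hg : (h2 :: t2).getLast? with
      | none => simp at hg
      | some g => cases g with
        | inl x => cases r with
          | nil => simp
          | cons r0 rt => cases r0 <;> simp
        | inr s => cases r with
          | nil => simp
          | cons r0 rt => cases r0 <;> simp

theorem pvJnNil : PySem.Str.join "" ([] : List String) = "" := by decide

theorem pvJnCons (a : String) (l : List String) :
    PySem.Str.join "" (a :: l) = a ++ PySem.Str.join "" l := by
  rw [← String.toList_inj]
  cases l <;> simp [PySem.Chars.join, List.intercalate]

-- rendering of a token list (what B's map-and-join computes)
def pvRender : List pvTok → String
  | [] => ""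
  | Sum.inl n :: rest => PySem.Int.toStr n ++ pvRender rest
  | Sum.inr s :: rest => s ++ pvRender rest

theorem pvAltRender (ts : List pvTok) :
    PySem.Str.join ""
      (ts.map (fun t => match t with | Sum.inl n => PySem.Int.toStr n | Sum.inr s => s)) = pvRender ts := by
  induction ts with
  | nil => simp [pvRender, pvJnNil]
  | cons h t ih => cases h <;> simp [pvRender, pvJnCons, ih]

-- the canonical token list of a rank, built structurally
def pvToks : List String → List pvTok
  | [] => []
  | x :: xs => pvMergeRec [if x = " " then Sum.inl 1 else Sum.inr x] (pvToks xs)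

theorem pvMergeRec_nil (a : List pvTok) : pvMergeRec a [] = a := by
  induction a with
  | nil => rfl
  | cons h t ih =>
    cases t with
    | nil => cases h <;> rfl
    | cons h2 t2 => simp only [pvMergeRec] at ih ⊢; rw [ih]

-- merging a singleton associates over a merge with a non-empty middle list
theorem pvMergeRec_singleton_assoc (t : pvTok) (A B : List pvTok) (hA : A ≠ []) :
    pvMergeRec (pvMergeRec [t] A) B = pvMergeRec [t] (pvMergeRec A B) := by
  cases B with
  | nil => rw [pvMergeRec_nil, pvMergeRec_nil]
  | cons B0 Bt =>
    cases A with
    | nil => exact absurd rfl hA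
    | cons A0 At =>
      cases t with
      | inl x =>
        cases A0 with
        | inl y =>
          -- seam merges: [inl x] ⬝ (inl y :: At) = inl (x+y) :: At
          cases At with
          | nil =>
            cases B0 with
            | inl b => simp only [pvMergeRec]; rw [Int.add_assoc]
            | inr s => simp only [pvMergeRec]
          | cons A1 At' =>
            simp only [pvMergeRec]
        | inr s =>
          cases At with
          | nil => cases B0 <;> simp only [pvMergeRec]
          | cons A1 At' => simp only [pvMergeRec]
      | inr p =>
        cases At with
        | nil => cases A0 <;> cases B0 <;> simp only [pvMergeRec]
        | cons A1 At' => simp only [pvMergeRec]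

theorem pvToks_ne_nil (a : List String) (h : a ≠ []) : pvToks a ≠ [] := by
  cases a with
  | nil => exact absurd rfl h
  | cons x xs =>
    simp only [pvToks]
    cases hxs : pvToks xs with
    | nil => cases hx : (if x = " " then (Sum.inl 1 : pvTok) else Sum.inr x) <;> simp [pvMergeRec]
    | cons h2 t2 =>
      cases hx : (if x = " " then (Sum.inl 1 : pvTok) else Sum.inr x) <;>
        cases h2 <;> simp [pvMergeRec]

-- merging the token lists of two non-empty ranks gives the token list of their concatenation
theorem pvMergeRec_toks (a b : List String) (ha : a ≠ []) :
    pvMergeRec (pvToks a) (pvToks b) = pvToks (a ++ b) := by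
  induction a with
  | nil => exact absurd rfl ha
  | cons x xs ih =>
    cases hxs : xs with
    | nil =>
      subst hxs
      simp only [pvToks, pvMergeRec_nil, List.singleton_append]
    | cons x2 xs2 =>
      have hxs' : xs ≠ [] := by rw [hxs]; exact List.cons_ne_nil _ _
      rw [← hxs]
      have h1 : pvToks (x :: xs) = pvMergeRec [if x = " " then Sum.inl 1 else Sum.inr x] (pvToks xs) := rfl
      have h2 : pvToks ((x :: xs) ++ b) = pvMergeRec [if x = " " then Sum.inl 1 else Sum.inr x] (pvToks (xs ++ b)) := rfl
      rw [h1, h2, pvMergeRec_singleton_assoc _ _ _ (pvToks_ne_nil xs hxs'), ih hxs']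

theorem pvConquer_eq_toks (seg : List String) (h : seg ≠ []) : pvConquer seg = pvToks seg := by
  induction hn : seg.length using Nat.strong_induction_on generalizing seg with
  | _ n ih =>
    by_cases hlen : seg.length ≤ 1
    · cases seg with
      | nil => exact absurd rfl h
      | cons x xs =>
        cases xs with
        | nil =>
          have h1 : ([x] : List String).length ≤ 1 := by simp
          rw [pvConquer, dif_pos h1]
          show (if x = " " then [Sum.inl 1] else [Sum.inr x]) = _
          simp only [pvToks, pvMergeRec_nil]
          split <;> rfl
        | cons y ys => simp at hlen
    · rw [pvConquer]
      simp only [hlen, dite_false]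
      have hlen2 : 2 ≤ seg.length := by omega
      have htake : (seg.take (seg.length / 2)).length = seg.length / 2 := by
        simp only [List.length_take]; omega
      have hdrop : (seg.drop (seg.length / 2)).length = seg.length - seg.length / 2 := by
        simp only [List.length_drop]
      have htne : seg.take (seg.length / 2) ≠ [] := by
        intro hc; rw [hc] at htake; simp at htake; omega
      have hdne : seg.drop (seg.length / 2) ≠ [] := by
        intro hc; rw [hc] at hdrop; simp at hdrop; omega
      rw [ih _ (by omega : (seg.take (seg.length / 2)).length < n) _ htne rfl,
          ih _ (by omega : (seg.drop (seg.length / 2)).length < n) _ hdne rfl,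
          pvMerge_eq_rec, pvMergeRec_toks _ _ htne, List.take_append_drop]

-- rendering with a pending count of n not-yet-flushed spaces
def pvPend (n : Nat) : List pvTok → String
  | [] => if 0 < n then PySem.Int.toStr (n : Int) else ""
  | Sum.inl m :: rest => PySem.Int.toStr ((n : Int) + m) ++ pvRender rest
  | Sum.inr s :: rest => (if 0 < n then PySem.Int.toStr (n : Int) else "") ++ pvRender (Sum.inr s :: rest)

theorem pvPendZero (ts : List pvTok) : pvPend 0 ts = pvRender ts := by
  cases ts with
  | nil => simp [pvPend, pvRender]
  | cons h t => cases h <;> simp [pvPend, pvRender]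

-- A's accumulator only grows on the left
theorem pvALoopFactor (l : List String) (comp : List String) (ec : Int) :
    pvALoop l comp ec = comp ++ pvALoop l [] ec := by
  induction l generalizing comp ec with
  | nil => simp only [pvALoop]; split_ifs <;> simp
  | cons x xs ih =>
    simp only [pvALoop]
    split_ifs with h h2
    · exact ih comp (ec + 1)
    · rw [ih (comp ++ [PySem.Int.toStr ec] ++ [x]), ih ([] ++ [PySem.Int.toStr ec] ++ [x])]
      simp
    · rw [ih (comp ++ [] ++ [x]), ih ([] ++ [] ++ [x])]
      simp

theorem pvMain (l : List String) (n : Nat) :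
    PySem.Str.join "" (pvALoop l [] (n : Int)) = pvPend n (pvToks l) := by
  induction l generalizing n with
  | nil =>
    simp only [pvALoop, pvToks, pvPend]
    split_ifs with h1 h2 h3
    · simp [pvJnCons, pvJnNil]
    · omega
    · omega
    · exact pvJnNil
  | cons x xs ih =>
    by_cases hx : x = " "
    · subst hx
      have hstep : pvALoop (" " :: xs) [] (n : Int) = pvALoop xs [] ((n : Int) + 1) := by
        simp [pvALoop]
      have hcast : ((n : Int) + 1) = ((n + 1 : Nat) : Int) := by push_cast; ring
      rw [hstep, hcast, ih (n + 1)]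
      have htoks : pvToks (" " :: xs) = pvMergeRec [Sum.inl 1] (pvToks xs) := by
        simp [pvToks]
      rw [htoks]
      cases hr : pvToks xs with
      | nil => simp [pvMergeRec, pvPend, pvRender]
      | cons h t =>
        cases h with
        | inl m =>
          simp only [pvMergeRec, pvPend]
          congr 2
          push_cast; ring
        | inr s =>
          simp only [pvMergeRec, pvPend]
          simp only [Nat.zero_lt_succ, if_pos, pvRender]
          rw [hcast]
    · simp only [pvALoop, if_neg hx]
      rw [pvALoopFactor]
      have hflush : PySem.Str.join ""
          (([] ++ (if (n : Int) > 0 then [PySem.Int.toStr (n : Int)] else []) ++ [x]) ++ pvALoop xs [] 0) =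
          (if 0 < n then PySem.Int.toStr (n : Int) else "") ++ (x ++ PySem.Str.join "" (pvALoop xs [] 0)) := by
        by_cases hn : 0 < n
        · simp [hn, pvJnCons]
        · simp [hn, pvJnCons]
      rw [hflush]
      have h0 : ((0 : Nat) : Int) = (0 : Int) := rfl
      rw [← h0, ih 0, pvPendZero]
      have htoks : pvToks (x :: xs) = pvMergeRec [Sum.inr x] (pvToks xs) := by
        simp [pvToks, hx]
      rw [htoks]
      cases hr : pvToks xs with
      | nil => simp [pvMergeRec, pvPend, pvRender]
      | cons h t =>
        cases h <;>
          simp [pvMergeRec, pvPend, pvRender]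

-- ===== VERDICT (by name: the statement is the Claim_ definition above) =====
theorem compress_rank_py_spec : Claim_equal_compress_rank_py := by
  intro l _
  unfold Spec_compress_rank_py compress_rank_py compress_rank_py_alt
  cases hl : l with
  | nil => simp [pvALoop, pvJnNil]
  | cons x xs =>
    rw [← hl]
    have hne : l ≠ [] := by rw [hl]; exact List.cons_ne_nil _ _
    rw [if_neg hne]
    rw [pvAltRender, pvConquer_eq_toks l hne]
    have h0 : (0 : Int) = ((0 : Nat) : Int) := rfl
    rw [h0, pvMain l 0, pvPendZero]
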